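-- pv_equiv track=rewrite | github.com/41shuyuliu/paper-pdf-flow | scripts/pdf_to_flow_note.py | zh_main_conclusion
-- ===== SOURCE A (Python) =====
-- from typing import Dict, List, Tuple
--
-- def detect_caption_tags(caption: str) -> List[str]:
--     c = caption.lower()
--     tags: List[str] = []
--
--     def add(tag: str) -> None:
--         if tag not in tags:
--             tags.append(tag)
--
--     if "schematic" in c or "pipeline" in c:
--         add("流程/装置示意")
--     if "bioprint" in c:
--         add("生物打印构建")
--     if "matrigel" in c:
--         add("Matrigel 几何与厚度优化")
--     if "viability" in c:
--         add("细胞活性验证")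
--     if "transcript" in c or "rna" in c:
--         add("转录组/分子一致性对比")
--     if "tracking" in c or "interferometry" in c or "hslci" in c:
--         add("单类器官追踪与动态成像")
--     if "drug" in c or "treated" in c or "response" in c:
--         add("药物响应分析")
--     if "resistant" in c or "sensitive" in c or "heterogeneity" in c:
--         add("耐药/敏感亚群与异质性")
--     if "atp" in c:
--         add("终点 ATP 对照")
--
--     return tags
--
-- def zh_main_conclusion(figs: List[Tuple[str, str]], signals: Dict[str, List[str]]) -> List[str]:
--     all_tags: List[str] = []
--     for _, cap in figs:
--         for t in detect_caption_tags(cap):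
--             if t not in all_tags:
--                 all_tags.append(t)
--
--     parts = []
--     if "生物打印构建" in all_tags and "单类器官追踪与动态成像" in all_tags:
--         parts.append("论文建立了“生物打印 + 动态成像追踪”的一体化流程。")
--     if "药物响应分析" in all_tags:
--         parts.append("核心结果显示该流程可用于量化药物响应过程，而不仅是单一终点读数。")
--     if "耐药/敏感亚群与异质性" in all_tags:
--         parts.append("进一步结果强调了样本内耐药/敏感亚群识别能力。")
--     if not parts:
--         parts.append("论文通过多幅图构建了从方法到验证的完整证据链。")
--
--     if signals.get("timepoints") or signals.get("doses"):
--         parts.append("文中包含明确时间点与剂量设定，可支持后续复现实验设计。")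
--
--     return parts[:3]
-- ===== SOURCE B (Python) =====
-- from typing import Dict, List, Tuple
--
-- def zh_main_conclusion(figs: List[Tuple[str, str]], signals: Dict[str, List[str]]) -> List[str]:
--     caps = [cap.lower() for _, cap in figs]
--
--     def has(*kws: str) -> bool:
--         return any(k in c for c in caps for k in kws)
--
--     core: List[str] = []
--     if has("bioprint") and has("tracking", "interferometry", "hslci"):
--         core += ["论文建立了“生物打印 + 动态成像追踪”的一体化流程。"]
--     if has("drug", "treated", "response"):
--         core += ["核心结果显示该流程可用于量化药物响应过程，而不仅是单一终点读数。"]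
--     if has("resistant", "sensitive", "heterogeneity"):
--         core += ["进一步结果强调了样本内耐药/敏感亚群识别能力。"]
--
--     parts = core or ["论文通过多幅图构建了从方法到验证的完整证据链。"]
--     if signals.get("timepoints") or signals.get("doses"):
--         parts = parts + ["文中包含明确时间点与剂量设定，可支持后续复现实验设计。"]
--     return parts[:3]
-- ===== Notes on version B (the rewrite author's own statement) =====
-- stated objective: simpler
-- what changed: B drops the intermediate Chinese tag vocabulary entirely: instead of building a deduplicated tag list per caption via detect_caption_tags and a global all_tags list, it lowercases each caption once and tests the four keyword groups that actually influence the output directly with any(), then assembles the sentences by list concatenation.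
import Mathlib
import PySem

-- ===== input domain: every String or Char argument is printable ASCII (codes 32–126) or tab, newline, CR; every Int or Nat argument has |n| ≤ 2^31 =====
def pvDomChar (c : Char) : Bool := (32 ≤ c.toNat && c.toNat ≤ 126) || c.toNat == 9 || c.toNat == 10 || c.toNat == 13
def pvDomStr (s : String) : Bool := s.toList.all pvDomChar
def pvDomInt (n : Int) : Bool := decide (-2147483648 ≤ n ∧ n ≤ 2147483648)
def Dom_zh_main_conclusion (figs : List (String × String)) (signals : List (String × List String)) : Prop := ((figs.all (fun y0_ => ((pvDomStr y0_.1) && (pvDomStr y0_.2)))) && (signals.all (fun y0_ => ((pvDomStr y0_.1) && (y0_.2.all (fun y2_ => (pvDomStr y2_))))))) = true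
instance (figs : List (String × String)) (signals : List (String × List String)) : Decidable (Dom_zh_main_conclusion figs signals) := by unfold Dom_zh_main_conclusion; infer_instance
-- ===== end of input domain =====

-- B replaces A's intermediate Chinese tag vocabulary (detect_caption_tags + dedup lists) by
-- direct any()-tests of the four keyword groups that influence the output; objective: simpler.

-- ===== PORT A =====

-- Python's local `add` in detect_caption_tags / the dedup-append in zh_main_conclusion
def pvAdd (tags : List String) (t : String) : List String :=
  if tags.contains t then tags else tags ++ [t]

-- one `if <keyword test>: add(<tag>)` statement of detect_caption_tags
def tagStep (b : Bool) (t : String) (tags : List String) : List String :=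
  if b then pvAdd tags t else tags

def detect_caption_tags (caption : String) : List String :=
  let c := PySem.Str.lower caption
  tagStep (PySem.Str.isIn "atp" c) "终点 ATP 对照" <|
  tagStep (PySem.Str.isIn "resistant" c || PySem.Str.isIn "sensitive" c || PySem.Str.isIn "heterogeneity" c) "耐药/敏感亚群与异质性" <|
  tagStep (PySem.Str.isIn "drug" c || PySem.Str.isIn "treated" c || PySem.Str.isIn "response" c) "药物响应分析" <|
  tagStep (PySem.Str.isIn "tracking" c || PySem.Str.isIn "interferometry" c || PySem.Str.isIn "hslci" c) "单类器官追踪与动态成像" <|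
  tagStep (PySem.Str.isIn "transcript" c || PySem.Str.isIn "rna" c) "转录组/分子一致性对比" <|
  tagStep (PySem.Str.isIn "viability" c) "细胞活性验证" <|
  tagStep (PySem.Str.isIn "matrigel" c) "Matrigel 几何与厚度优化" <|
  tagStep (PySem.Str.isIn "bioprint" c) "生物打印构建" <|
  tagStep (PySem.Str.isIn "schematic" c || PySem.Str.isIn "pipeline" c) "流程/装置示意" []

def zh_main_conclusion (figs : List (String × String)) (signals : List (String × List String)) : List String :=
  let all_tags := figs.foldl (fun acc p => (detect_caption_tags p.2).foldl pvAdd acc) []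
  let parts : List String := []
  let parts := if all_tags.contains "生物打印构建" && all_tags.contains "单类器官追踪与动态成像" then
      parts ++ ["论文建立了“生物打印 + 动态成像追踪”的一体化流程。"] else parts
  let parts := if all_tags.contains "药物响应分析" then
      parts ++ ["核心结果显示该流程可用于量化药物响应过程，而不仅是单一终点读数。"] else parts
  let parts := if all_tags.contains "耐药/敏感亚群与异质性" then
      parts ++ ["进一步结果强调了样本内耐药/敏感亚群识别能力。"] else parts
  let parts := if parts.isEmpty then parts ++ ["论文通过多幅图构建了从方法到验证的完整证据链。"] else parts
  -- signals.get(k) is truthy iff the key is present with a nonempty list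
  let truthy := fun (k : String) => match (PySem.Dict.mk signals).get? k with
    | some l => !l.isEmpty
    | none => false
  let parts := if truthy "timepoints" || truthy "doses" then
      parts ++ ["文中包含明确时间点与剂量设定，可支持后续复现实验设计。"] else parts
  PySem.List.slice parts none (some 3)

-- ===== PORT B =====

def zh_main_conclusion_alt (figs : List (String × String)) (signals : List (String × List String)) : List String :=
  let caps := figs.map (fun p => PySem.Str.lower p.2)
  let has := fun (kws : List String) => caps.any (fun c => kws.any (fun k => PySem.Str.isIn k c))
  let core : List String :=
    (if has ["bioprint"] && has ["tracking", "interferometry", "hslci"] then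
       ["论文建立了“生物打印 + 动态成像追踪”的一体化流程。"] else []) ++
    (if has ["drug", "treated", "response"] then
       ["核心结果显示该流程可用于量化药物响应过程，而不仅是单一终点读数。"] else []) ++
    (if has ["resistant", "sensitive", "heterogeneity"] then
       ["进一步结果强调了样本内耐药/敏感亚群识别能力。"] else [])
  let parts := if core.isEmpty then ["论文通过多幅图构建了从方法到验证的完整证据链。"] else core
  let truthy := fun (k : String) => match (PySem.Dict.mk signals).get? k with
    | some l => !l.isEmpty
    | none => false
  let parts := if truthy "timepoints" || truthy "doses" then
      parts ++ ["文中包含明确时间点与剂量设定，可支持后续复现实验设计。"] else parts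
  parts.take 3

-- ===== PRECONDITION & SPEC =====
def Spec_zh_main_conclusion (figs : List (String × String)) (signals : List (String × List String)) (out : List String) : Prop := out = zh_main_conclusion_alt figs signals
instance (figs : List (String × String)) (signals : List (String × List String)) (out : List String) : Decidable (Spec_zh_main_conclusion figs signals out) := by unfold Spec_zh_main_conclusion; infer_instance

-- ===== CLAIM (what is proved, stated in full; the proofs are below) =====
def Claim_equal_zh_main_conclusion : Prop := ∀ (figs : List (String × String)) (signals : List (String × List String)), Dom_zh_main_conclusion figs signals → Spec_zh_main_conclusion figs signals (zh_main_conclusion figs signals)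

-- ===== LEMMAS AND PROOFS =====

theorem mem_pvAdd (l : List String) (s t : String) : t ∈ pvAdd l s ↔ t ∈ l ∨ t = s := by
  unfold pvAdd
  split_ifs with h
  · simp only [List.contains_iff_mem] at h
    constructor
    · exact Or.inl
    · rintro (h' | rfl) <;> [exact h'; exact h]
  · simp

theorem mem_tagStep (b : Bool) (s : String) (l : List String) (t : String) :
    t ∈ tagStep b s l ↔ t ∈ l ∨ (b = true ∧ t = s) := by
  unfold tagStep; cases b <;> simp [mem_pvAdd]

theorem mem_foldl_pvAdd (l acc : List String) (t : String) :
    t ∈ l.foldl pvAdd acc ↔ t ∈ acc ∨ t ∈ l := by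
  induction l generalizing acc with
  | nil => simp
  | cons x xs ih => simp [List.foldl_cons, ih, mem_pvAdd]; tauto

theorem mem_foldl_outer (g : (String × String) → List String) (figs : List (String × String)) (t : String) :
    t ∈ figs.foldl (fun acc p => (g p).foldl pvAdd acc) [] ↔ ∃ p ∈ figs, t ∈ g p := by
  have key : ∀ (fs : List (String × String)) (acc : List String),
      t ∈ fs.foldl (fun acc p => (g p).foldl pvAdd acc) acc ↔
        t ∈ acc ∨ ∃ p ∈ fs, t ∈ g p := by
    intro fs
    induction fs with
    | nil => simp
    | cons x xs ih => intro acc; simp [List.foldl_cons, ih, mem_foldl_pvAdd]; tauto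
  simpa using key figs []

theorem mem_allTags (figs : List (String × String)) (t : String) :
    t ∈ figs.foldl (fun acc p => (detect_caption_tags p.2).foldl pvAdd acc) [] ↔
      ∃ p ∈ figs, t ∈ detect_caption_tags p.2 :=
  mem_foldl_outer (fun p => detect_caption_tags p.2) figs t

theorem slice_take_three (xs : List String) : PySem.List.slice xs none (some 3) = xs.take 3 := by
  rw [PySem.List.slice_to xs (by norm_num : (0:Int) ≤ 3)]
  rfl

def pvHas (figs : List (String × String)) (kws : List String) : Bool :=
  (figs.map (fun p => PySem.Str.lower p.2)).any (fun c => kws.any fun k => PySem.Str.isIn k c)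

theorem contains_eq_has (figs : List (String × String)) (tag : String) (kws : List String)
    (h : ∀ cap : String, tag ∈ detect_caption_tags cap ↔
      (kws.any fun k => PySem.Str.isIn k (PySem.Str.lower cap)) = true) :
    (figs.foldl (fun acc p => (detect_caption_tags p.2).foldl pvAdd acc) []).contains tag =
      pvHas figs kws := by
  rw [Bool.eq_iff_iff, List.contains_iff_mem, mem_allTags]
  simp [pvHas, List.any_map, List.any_eq_true, h]

theorem contains_bio (figs : List (String × String)) :
    (figs.foldl (fun acc p => (detect_caption_tags p.2).foldl pvAdd acc) []).contains "生物打印构建" =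
      pvHas figs ["bioprint"] := by
  refine contains_eq_has figs _ _ (fun cap => ?_)
  simp [detect_caption_tags, mem_tagStep]

theorem contains_track (figs : List (String × String)) :
    (figs.foldl (fun acc p => (detect_caption_tags p.2).foldl pvAdd acc) []).contains "单类器官追踪与动态成像" =
      pvHas figs ["tracking", "interferometry", "hslci"] := by
  refine contains_eq_has figs _ _ (fun cap => ?_)
  simp [detect_caption_tags, mem_tagStep, Bool.or_assoc]

theorem contains_drug (figs : List (String × String)) :
    (figs.foldl (fun acc p => (detect_caption_tags p.2).foldl pvAdd acc) []).contains "药物响应分析" =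
      pvHas figs ["drug", "treated", "response"] := by
  refine contains_eq_has figs _ _ (fun cap => ?_)
  simp [detect_caption_tags, mem_tagStep, Bool.or_assoc]

theorem contains_het (figs : List (String × String)) :
    (figs.foldl (fun acc p => (detect_caption_tags p.2).foldl pvAdd acc) []).contains "耐药/敏感亚群与异质性" =
      pvHas figs ["resistant", "sensitive", "heterogeneity"] := by
  refine contains_eq_has figs _ _ (fun cap => ?_)
  simp [detect_caption_tags, mem_tagStep, Bool.or_assoc]

-- ===== VERDICT (by name: the statement is the Claim_ definition above) =====
set_option maxHeartbeats 2000000 in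
theorem zh_main_conclusion_spec : Claim_equal_zh_main_conclusion := by
  intro figs signals _
  show zh_main_conclusion figs signals = zh_main_conclusion_alt figs signals
  simp only [zh_main_conclusion, zh_main_conclusion_alt, contains_bio, contains_track,
    contains_drug, contains_het, slice_take_three]
  have e1 : (List.map (fun p => PySem.Str.lower p.2) figs).any
      (fun c => List.any ["bioprint"] fun k => PySem.Str.isIn k c) = pvHas figs ["bioprint"] := rfl
  have e2 : (List.map (fun p => PySem.Str.lower p.2) figs).any
      (fun c => List.any ["tracking", "interferometry", "hslci"] fun k => PySem.Str.isIn k c) =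
      pvHas figs ["tracking", "interferometry", "hslci"] := rfl
  have e3 : (List.map (fun p => PySem.Str.lower p.2) figs).any
      (fun c => List.any ["drug", "treated", "response"] fun k => PySem.Str.isIn k c) =
      pvHas figs ["drug", "treated", "response"] := rfl
  have e4 : (List.map (fun p => PySem.Str.lower p.2) figs).any
      (fun c => List.any ["resistant", "sensitive", "heterogeneity"] fun k => PySem.Str.isIn k c) =
      pvHas figs ["resistant", "sensitive", "heterogeneity"] := rfl
  simp only [e1, e2, e3, e4]
  generalize pvHas figs ["bioprint"] = b1
  generalize pvHas figs ["tracking", "interferometry", "hslci"] = b2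
  generalize pvHas figs ["drug", "treated", "response"] = b3
  generalize pvHas figs ["resistant", "sensitive", "heterogeneity"] = b4
  cases b1 <;> cases b2 <;> cases b3 <;> cases b4 <;> split_ifs <;> simp_all
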